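-- pv_equiv track=rewrite | github.com/AnjaliTamilvanan/Smart-Devtool | api-devtool/backend/services/code_generator.py | replace_path_params
-- ===== SOURCE A (Python) =====
-- def replace_path_params(endpoint):
--     replacements = {
--         "{id}": "1",
--         "{name}": "india",
--         "{code}": "IN",
--         "{region}": "asia",
--     }
--
--     for key, value in replacements.items():
--         endpoint = endpoint.replace(key, value)
--
--     return endpoint
-- ===== SOURCE B (Python) =====
-- import re
--
-- _PATTERN = re.compile(r"\{(?:id|name|code|region)\}")
--
-- _MAPPING = {"{id}": "1", "{name}": "india", "{code}": "IN", "{region}": "asia"}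
--
--
-- def replace_path_params(endpoint):
--     return _PATTERN.sub(lambda m: _MAPPING[m.group(0)], endpoint)
-- ===== Notes on version B (the rewrite author's own statement) =====
-- stated objective: idiomatic
-- what changed: Replaces the four sequential whole-string str.replace passes by one precompiled regex pass that substitutes each matched placeholder via a dict lookup in a single left-to-right scan.
import Mathlib
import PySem

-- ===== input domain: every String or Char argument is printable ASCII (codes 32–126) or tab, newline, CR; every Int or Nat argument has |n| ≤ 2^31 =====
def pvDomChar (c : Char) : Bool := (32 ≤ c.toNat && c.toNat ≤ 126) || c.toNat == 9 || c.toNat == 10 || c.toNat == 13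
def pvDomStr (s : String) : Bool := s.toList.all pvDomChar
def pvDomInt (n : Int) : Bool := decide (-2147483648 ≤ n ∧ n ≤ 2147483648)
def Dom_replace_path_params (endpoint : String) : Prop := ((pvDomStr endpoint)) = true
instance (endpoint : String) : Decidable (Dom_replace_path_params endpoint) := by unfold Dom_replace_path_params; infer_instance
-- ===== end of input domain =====

-- B replaces A's four sequential whole-string str.replace passes by a single left-to-right
-- scan (a regex-substitution pass in Python) that substitutes each placeholder as it is met;
-- objective: idiomatic single pass, same result.

-- ===== PORT A =====
-- A builds a dict of replacements and folds str.replace over its items (insertion order).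
def replace_path_params (endpoint : String) : String :=
  let replacements : List (String × String) :=
    [("{id}", "1"), ("{name}", "india"), ("{code}", "IN"), ("{region}", "asia")]
  replacements.foldl (fun e kv => PySem.Str.replace e kv.1 kv.2) endpoint

-- ===== PORT B =====
-- Source B does one regex pass re.sub(r"\{(?:id|name|code|region)\}", mapping lookup, endpoint).
-- PySem has no regex, so the pass is ported by hand: a single left-to-right scan that, at each
-- position, matches the fixed alternation (in its order) and emits the mapped value, else copies
-- the character.  Exact for this fixed literal pattern: re.sub scans left to right and takes the
-- first alternative that matches at the current position.
def pvScanSub : List Char → List Char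
  | [] => []
  | c :: t =>
    if ['{', 'i', 'd', '}'].isPrefixOf (c :: t) then
      '1' :: pvScanSub (t.drop 3)
    else if ['{', 'n', 'a', 'm', 'e', '}'].isPrefixOf (c :: t) then
      'i' :: 'n' :: 'd' :: 'i' :: 'a' :: pvScanSub (t.drop 5)
    else if ['{', 'c', 'o', 'd', 'e', '}'].isPrefixOf (c :: t) then
      'I' :: 'N' :: pvScanSub (t.drop 5)
    else if ['{', 'r', 'e', 'g', 'i', 'o', 'n', '}'].isPrefixOf (c :: t) then
      'a' :: 's' :: 'i' :: 'a' :: pvScanSub (t.drop 7)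
    else
      c :: pvScanSub t
termination_by l => l.length
decreasing_by all_goals simp [List.length_drop]

def replace_path_params_alt (endpoint : String) : String :=
  String.ofList (pvScanSub endpoint.toList)

-- ===== PRECONDITION & SPEC =====
def Spec_replace_path_params (endpoint : String) (out : String) : Prop := out = replace_path_params_alt endpoint
instance (endpoint : String) (out : String) : Decidable (Spec_replace_path_params endpoint out) := by unfold Spec_replace_path_params; infer_instance

-- ===== CLAIM (what is proved, stated in full; the proofs are below) =====
def Claim_equal_replace_path_params : Prop := ∀ (endpoint : String), Dom_replace_path_params endpoint → Spec_replace_path_params endpoint (replace_path_params endpoint)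

-- ===== LEMMAS AND PROOFS =====

-- Clean recursive form of Python's s.replace(old, new) for nonempty old.
def pvRep1 (old new : List Char) : List Char → List Char
  | [] => []
  | c :: t =>
    if old.isPrefixOf (c :: t) then new ++ pvRep1 old new (t.drop (old.length - 1))
    else c :: pvRep1 old new t
termination_by l => l.length
decreasing_by all_goals simp [List.length_drop]

theorem pvRep1_nil (old new : List Char) : pvRep1 old new [] = [] := by simp [pvRep1]

theorem pvRep1_cons_pos (old new : List Char) (c : Char) (t : List Char)
    (h : old <+: c :: t) :
    pvRep1 old new (c :: t) = new ++ pvRep1 old new (t.drop (old.length - 1)) := by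
  rw [pvRep1, if_pos (List.isPrefixOf_iff_prefix.mpr h)]

theorem pvRep1_cons_neg (old new : List Char) (c : Char) (t : List Char)
    (h : ¬ old <+: c :: t) :
    pvRep1 old new (c :: t) = c :: pvRep1 old new t := by
  rw [pvRep1, if_neg (fun hb => h (List.isPrefixOf_iff_prefix.mp hb))]

theorem pvRep1_append_key (o : Char) (os new x : List Char) :
    pvRep1 (o :: os) new ((o :: os) ++ x) = new ++ pvRep1 (o :: os) new x := by
  rw [List.cons_append, pvRep1_cons_pos (o :: os) new o (os ++ x) (by exact ⟨x, by simp⟩)]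
  simp

theorem pvRep1_append_clean (K' new : List Char) (v : List Char) (hv : '{' ∉ v) :
    ∀ x, pvRep1 ('{' :: K') new (v ++ x) = v ++ pvRep1 ('{' :: K') new x := by
  induction v with
  | nil => intro x; simp
  | cons c v' ih =>
    intro x
    have hc : c ≠ '{' := fun h => hv (by simp [h])
    rw [List.cons_append, pvRep1_cons_neg _ _ _ _ (fun hp => by
      rcases List.cons_prefix_cons.mp hp with ⟨h1, _⟩
      exact hc h1.symm)]
    rw [ih (fun h => hv (List.mem_cons_of_mem _ h)) x, List.cons_append]

-- If p is a prefix of the replaced string and p shares no prefix relation with the value v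
-- (on any of its nonempty suffixes), then p was already a prefix of the original string.
theorem pvRep1_prefix_rev (o : Char) (os v p : List Char)
    (hp : ∀ q, q <:+ p → q ≠ [] → ¬ q <+: v ∧ ¬ v <+: q) :
    ∀ n x, x.length ≤ n → p <+: pvRep1 (o :: os) v x → p <+: x := by
  intro n
  induction n generalizing p with
  | zero =>
    intro x hx h
    have : x = [] := List.length_eq_zero_iff.mp (Nat.le_zero.mp hx)
    subst this
    simpa [pvRep1_nil] using h
  | succ m ih =>
    intro x hx h
    cases x with
    | nil => simpa [pvRep1_nil] using h
    | cons c t =>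
      by_cases hpre : (o :: os) <+: c :: t
      · rw [pvRep1_cons_pos _ _ _ _ hpre] at h
        cases p with
        | nil => exact List.nil_prefix
        | cons a p' =>
          -- p <+: v ++ y forces p <+: v or v <+: p, both excluded by hp
          obtain ⟨r, hr⟩ := h
          rcases (List.append_eq_append_iff.mp hr) with ⟨w, hw1, _⟩ | ⟨w, hw1, _⟩
          · exact absurd ⟨w, hw1.symm⟩ (hp (a :: p') List.suffix_rfl (by simp)).1
          · exact absurd ⟨w, hw1.symm⟩ (hp (a :: p') List.suffix_rfl (by simp)).2
      · rw [pvRep1_cons_neg _ _ _ _ hpre] at h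
        cases p with
        | nil => exact List.nil_prefix
        | cons a p' =>
          rcases List.cons_prefix_cons.mp h with ⟨ha, hp'⟩
          have hp'' : ∀ q, q <:+ p' → q ≠ [] → ¬ q <+: v ∧ ¬ v <+: q := fun q hq =>
            hp q (hq.trans (List.suffix_cons _ _))
          have := ih p' hp'' t (by simpa using Nat.lt_succ_iff.mp (by simpa using hx)) hp'
          exact List.cons_prefix_cons.mpr ⟨ha, this⟩

-- shorthand for the suffix condition of pvRep1_prefix_rev, checked by decide on literals
theorem pvHp_of_tails (p v : List Char)
    (h : ∀ q ∈ p.tails, q ≠ [] → (¬ q.isPrefixOf v ∧ ¬ v.isPrefixOf q)) :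
    ∀ q, q <:+ p → q ≠ [] → ¬ q <+: v ∧ ¬ v <+: q := by
  intro q hq hne
  rcases h q ((List.mem_tails q p).mpr hq) hne with ⟨h1, h2⟩
  exact ⟨fun hc => h1 (List.isPrefixOf_iff_prefix.mpr hc),
         fun hc => h2 (List.isPrefixOf_iff_prefix.mpr hc)⟩

-- Characterisation of PySem's replace loop by pvRep1.
theorem pvGo_eq (old new : List Char) (hold : old ≠ []) :
    ∀ (fuel : Nat) (l acc : List Char), l.length ≤ fuel →
      PySem.Chars.replace.go old new fuel l acc = acc.reverse ++ pvRep1 old new l := by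
  intro fuel
  induction fuel with
  | zero =>
    intro l acc hl
    have : l = [] := List.length_eq_zero_iff.mp (Nat.le_zero.mp hl)
    subst this
    simp [PySem.Chars.replace.go, pvRep1_nil]
  | succ m ih =>
    intro l acc hl
    cases l with
    | nil => simp [PySem.Chars.replace.go, pvRep1_nil]
    | cons c t =>
      rw [PySem.Chars.replace.go]
      by_cases hpre : old.isPrefixOf (c :: t)
      · rw [if_pos hpre]
        obtain ⟨o, os, rfl⟩ : ∃ o os, old = o :: os := by
          cases old with
          | nil => exact absurd rfl hold
          | cons o os => exact ⟨o, os, rfl⟩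
        rw [ih (List.drop (o :: os).length (c :: t)) (new.reverse ++ acc)
              (by simp only [List.length_drop, List.length_cons] at hl ⊢; omega)]
        rw [pvRep1_cons_pos _ _ _ _ (List.isPrefixOf_iff_prefix.mp hpre)]
        simp
      · rw [if_neg hpre]
        rw [ih t (c :: acc) (by simpa using Nat.lt_succ_iff.mp (by simpa using hl))]
        rw [pvRep1_cons_neg _ _ _ _ (fun hp => hpre (List.isPrefixOf_iff_prefix.mpr hp))]
        simp

theorem pvReplace_eq (old new s : List Char) (hold : old ≠ []) :
    PySem.Chars.replace s old new = pvRep1 old new s := by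
  rw [PySem.Chars.replace, if_neg (by simpa using hold)]
  simpa using pvGo_eq old new hold s.length s [] le_rfl

-- The heart of the equivalence: one left-to-right scan equals the four sequential passes.
theorem pvMain : ∀ (n : Nat) (x : List Char), x.length ≤ n →
    pvScanSub x =
      pvRep1 ['{','r','e','g','i','o','n','}'] ['a','s','i','a']
        (pvRep1 ['{','c','o','d','e','}'] ['I','N']
          (pvRep1 ['{','n','a','m','e','}'] ['i','n','d','i','a']
            (pvRep1 ['{','i','d','}'] ['1'] x))) := by
  intro n
  induction n with
  | zero =>
    intro x hx
    have : x = [] := List.length_eq_zero_iff.mp (Nat.le_zero.mp hx)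
    subst this
    simp [pvScanSub, pvRep1_nil]
  | succ m ih =>
    intro x hx
    cases x with
    | nil => simp [pvScanSub, pvRep1_nil]
    | cons c t =>
      by_cases h1 : ['{','i','d','}'] <+: c :: t
      · obtain ⟨r, hr⟩ := h1
        have hx' : c :: t = '{' :: 'i' :: 'd' :: '}' :: r := hr.symm
        rw [hx']
        rw [show ('{' :: 'i' :: 'd' :: '}' :: r) = ['{','i','d','}'] ++ r from rfl] at *
        rw [pvRep1_append_key]
        rw [pvRep1_append_clean _ _ ['1'] (by decide)]
        rw [pvRep1_append_clean _ _ ['1'] (by decide)]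
        rw [pvRep1_append_clean _ _ ['1'] (by decide)]
        rw [show pvScanSub (['{','i','d','}'] ++ r) = '1' :: pvScanSub r by
          rw [pvScanSub.eq_def]; simp]
        have hlen : r.length + 4 = (c :: t).length := by rw [← hr]; simp
        have hr' : r.length ≤ m := by simp only [List.length_cons] at hlen hx; omega
        rw [ih r hr']
        rfl
      · by_cases h2 : ['{','n','a','m','e','}'] <+: c :: t
        · obtain ⟨r, hr⟩ := h2
          rw [← hr]
          rw [show pvScanSub (['{','n','a','m','e','}'] ++ r)
                = 'i' :: 'n' :: 'd' :: 'i' :: 'a' :: pvScanSub r by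
            rw [pvScanSub.eq_def]; simp]
          have e1 : pvRep1 ['{','i','d','}'] ['1'] (['{','n','a','m','e','}'] ++ r)
              = ['{','n','a','m','e','}'] ++ pvRep1 ['{','i','d','}'] ['1'] r := by
            rw [show (['{','n','a','m','e','}'] ++ r : List Char)
                  = '{' :: (['n','a','m','e','}'] ++ r) from rfl,
                pvRep1_cons_neg _ _ _ _ (by
                  intro hp; simp [List.cons_prefix_cons] at hp),
                pvRep1_append_clean _ _ ['n','a','m','e','}'] (by decide)]
            rfl
          rw [e1, pvRep1_append_key]
          rw [pvRep1_append_clean _ _ ['i','n','d','i','a'] (by decide)]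
          rw [pvRep1_append_clean _ _ ['i','n','d','i','a'] (by decide)]
          have hlen : r.length + 6 = (c :: t).length := by rw [← hr]; simp
          have hr' : r.length ≤ m := by simp only [List.length_cons] at hlen hx; omega
          rw [ih r hr']
          rfl
        · by_cases h3 : ['{','c','o','d','e','}'] <+: c :: t
          · obtain ⟨r, hr⟩ := h3
            rw [← hr]
            rw [show pvScanSub (['{','c','o','d','e','}'] ++ r)
                  = 'I' :: 'N' :: pvScanSub r by
              rw [pvScanSub.eq_def]; simp]
            have e1 : pvRep1 ['{','i','d','}'] ['1'] (['{','c','o','d','e','}'] ++ r)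
                = ['{','c','o','d','e','}'] ++ pvRep1 ['{','i','d','}'] ['1'] r := by
              rw [show (['{','c','o','d','e','}'] ++ r : List Char)
                    = '{' :: (['c','o','d','e','}'] ++ r) from rfl,
                  pvRep1_cons_neg _ _ _ _ (by
                    intro hp; simp [List.cons_prefix_cons] at hp),
                  pvRep1_append_clean _ _ ['c','o','d','e','}'] (by decide)]
              rfl
            have e2 : pvRep1 ['{','n','a','m','e','}'] ['i','n','d','i','a']
                  (['{','c','o','d','e','}'] ++ pvRep1 ['{','i','d','}'] ['1'] r)
                = ['{','c','o','d','e','}'] ++ pvRep1 ['{','n','a','m','e','}'] ['i','n','d','i','a']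
                    (pvRep1 ['{','i','d','}'] ['1'] r) := by
              rw [show (['{','c','o','d','e','}'] ++ pvRep1 ['{','i','d','}'] ['1'] r : List Char)
                    = '{' :: (['c','o','d','e','}'] ++ pvRep1 ['{','i','d','}'] ['1'] r) from rfl,
                  pvRep1_cons_neg _ _ _ _ (by
                    intro hp; simp [List.cons_prefix_cons] at hp),
                  pvRep1_append_clean _ _ ['c','o','d','e','}'] (by decide)]
              rfl
            rw [e1, e2, pvRep1_append_key]
            rw [pvRep1_append_clean _ _ ['I','N'] (by decide)]
            have hlen : r.length + 6 = (c :: t).length := by rw [← hr]; simp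
            have hr' : r.length ≤ m := by simp only [List.length_cons] at hlen hx; omega
            rw [ih r hr']
            rfl
          · by_cases h4 : ['{','r','e','g','i','o','n','}'] <+: c :: t
            · obtain ⟨r, hr⟩ := h4
              rw [← hr]
              rw [show pvScanSub (['{','r','e','g','i','o','n','}'] ++ r)
                    = 'a' :: 's' :: 'i' :: 'a' :: pvScanSub r by
                rw [pvScanSub.eq_def]; simp]
              have e1 : pvRep1 ['{','i','d','}'] ['1'] (['{','r','e','g','i','o','n','}'] ++ r)
                  = ['{','r','e','g','i','o','n','}'] ++ pvRep1 ['{','i','d','}'] ['1'] r := by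
                rw [show (['{','r','e','g','i','o','n','}'] ++ r : List Char)
                      = '{' :: (['r','e','g','i','o','n','}'] ++ r) from rfl,
                    pvRep1_cons_neg _ _ _ _ (by
                      intro hp; simp [List.cons_prefix_cons] at hp),
                    pvRep1_append_clean _ _ ['r','e','g','i','o','n','}'] (by decide)]
                rfl
              have e2 : pvRep1 ['{','n','a','m','e','}'] ['i','n','d','i','a']
                    (['{','r','e','g','i','o','n','}'] ++ pvRep1 ['{','i','d','}'] ['1'] r)
                  = ['{','r','e','g','i','o','n','}'] ++ pvRep1 ['{','n','a','m','e','}'] ['i','n','d','i','a']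
                      (pvRep1 ['{','i','d','}'] ['1'] r) := by
                rw [show (['{','r','e','g','i','o','n','}'] ++ pvRep1 ['{','i','d','}'] ['1'] r : List Char)
                      = '{' :: (['r','e','g','i','o','n','}'] ++ pvRep1 ['{','i','d','}'] ['1'] r) from rfl,
                    pvRep1_cons_neg _ _ _ _ (by
                      intro hp; simp [List.cons_prefix_cons] at hp),
                    pvRep1_append_clean _ _ ['r','e','g','i','o','n','}'] (by decide)]
                rfl
              have e3 : pvRep1 ['{','c','o','d','e','}'] ['I','N']
                    (['{','r','e','g','i','o','n','}'] ++ pvRep1 ['{','n','a','m','e','}'] ['i','n','d','i','a']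
                      (pvRep1 ['{','i','d','}'] ['1'] r))
                  = ['{','r','e','g','i','o','n','}'] ++ pvRep1 ['{','c','o','d','e','}'] ['I','N']
                      (pvRep1 ['{','n','a','m','e','}'] ['i','n','d','i','a']
                        (pvRep1 ['{','i','d','}'] ['1'] r)) := by
                rw [show (['{','r','e','g','i','o','n','}'] ++ pvRep1 ['{','n','a','m','e','}'] ['i','n','d','i','a']
                        (pvRep1 ['{','i','d','}'] ['1'] r) : List Char)
                      = '{' :: (['r','e','g','i','o','n','}'] ++ pvRep1 ['{','n','a','m','e','}'] ['i','n','d','i','a']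
                        (pvRep1 ['{','i','d','}'] ['1'] r)) from rfl,
                    pvRep1_cons_neg _ _ _ _ (by
                      intro hp; simp [List.cons_prefix_cons] at hp),
                    pvRep1_append_clean _ _ ['r','e','g','i','o','n','}'] (by decide)]
                rfl
              rw [e1, e2, e3, pvRep1_append_key]
              have hlen : r.length + 8 = (c :: t).length := by rw [← hr]; simp
              have hr' : r.length ≤ m := by simp only [List.length_cons] at hlen hx; omega
              rw [ih r hr']
              rfl
            · -- no placeholder starts here: both sides copy c
              rw [show pvScanSub (c :: t) = c :: pvScanSub t by
                rw [pvScanSub.eq_def]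
                simp [List.isPrefixOf_iff_prefix, h1, h2, h3, h4]]
              rw [pvRep1_cons_neg _ _ _ _ h1]
              have g2 : ¬ ['{','n','a','m','e','}'] <+: c :: pvRep1 ['{','i','d','}'] ['1'] t := by
                intro hp
                rcases List.cons_prefix_cons.mp hp with ⟨hc, hp'⟩
                have := pvRep1_prefix_rev '{' ['i','d','}'] ['1'] ['n','a','m','e','}']
                  (pvHp_of_tails _ _ (by decide)) t.length t le_rfl hp'
                exact h2 (List.cons_prefix_cons.mpr ⟨hc, this⟩)
              rw [pvRep1_cons_neg _ _ _ _ g2]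
              have g3 : ¬ ['{','c','o','d','e','}'] <+:
                  c :: pvRep1 ['{','n','a','m','e','}'] ['i','n','d','i','a']
                    (pvRep1 ['{','i','d','}'] ['1'] t) := by
                intro hp
                rcases List.cons_prefix_cons.mp hp with ⟨hc, hp'⟩
                have s2 := pvRep1_prefix_rev '{' ['n','a','m','e','}'] ['i','n','d','i','a']
                  ['c','o','d','e','}'] (pvHp_of_tails _ _ (by decide)) _ _ le_rfl hp'
                have s1 := pvRep1_prefix_rev '{' ['i','d','}'] ['1'] ['c','o','d','e','}']
                  (pvHp_of_tails _ _ (by decide)) _ _ le_rfl s2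
                exact h3 (List.cons_prefix_cons.mpr ⟨hc, s1⟩)
              rw [pvRep1_cons_neg _ _ _ _ g3]
              have g4 : ¬ ['{','r','e','g','i','o','n','}'] <+:
                  c :: pvRep1 ['{','c','o','d','e','}'] ['I','N']
                    (pvRep1 ['{','n','a','m','e','}'] ['i','n','d','i','a']
                      (pvRep1 ['{','i','d','}'] ['1'] t)) := by
                intro hp
                rcases List.cons_prefix_cons.mp hp with ⟨hc, hp'⟩
                have s3 := pvRep1_prefix_rev '{' ['c','o','d','e','}'] ['I','N']
                  ['r','e','g','i','o','n','}'] (pvHp_of_tails _ _ (by decide)) _ _ le_rfl hp'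
                have s2 := pvRep1_prefix_rev '{' ['n','a','m','e','}'] ['i','n','d','i','a']
                  ['r','e','g','i','o','n','}'] (pvHp_of_tails _ _ (by decide)) _ _ le_rfl s3
                have s1 := pvRep1_prefix_rev '{' ['i','d','}'] ['1']
                  ['r','e','g','i','o','n','}'] (pvHp_of_tails _ _ (by decide)) _ _ le_rfl s2
                exact h4 (List.cons_prefix_cons.mpr ⟨hc, s1⟩)
              rw [pvRep1_cons_neg _ _ _ _ g4]
              have hr' : t.length ≤ m := by simp only [List.length_cons] at hx; omega
              rw [ih t hr']

-- ===== VERDICT (by name: the statement is the Claim_ definition above) =====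
theorem replace_path_params_spec : Claim_equal_replace_path_params := by
  intro e _
  show replace_path_params e = replace_path_params_alt e
  apply String.toList_inj.mp
  show (PySem.Str.replace (PySem.Str.replace (PySem.Str.replace
          (PySem.Str.replace e "{id}" "1") "{name}" "india") "{code}" "IN")
            "{region}" "asia").toList
      = (String.ofList (pvScanSub e.toList)).toList
  rw [PySem.Str.toList_replace, PySem.Str.toList_replace, PySem.Str.toList_replace,
      PySem.Str.toList_replace]
  rw [pvReplace_eq _ _ _ (by decide), pvReplace_eq _ _ _ (by decide),
      pvReplace_eq _ _ _ (by decide), pvReplace_eq _ _ _ (by decide)]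
  rw [show ("{id}".toList : List Char) = ['{','i','d','}'] from rfl,
      show ("1".toList : List Char) = ['1'] from rfl,
      show ("{name}".toList : List Char) = ['{','n','a','m','e','}'] from rfl,
      show ("india".toList : List Char) = ['i','n','d','i','a'] from rfl,
      show ("{code}".toList : List Char) = ['{','c','o','d','e','}'] from rfl,
      show ("IN".toList : List Char) = ['I','N'] from rfl,
      show ("{region}".toList : List Char) = ['{','r','e','g','i','o','n','}'] from rfl,
      show ("asia".toList : List Char) = ['a','s','i','a'] from rfl]
  rw [← pvMain e.toList.length e.toList le_rfl]
  simp [String.toList_ofList]
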